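-- pv_equiv track=rewrite | github.com/CZboop/Challenges-and-Interview-Question-Practice | codewars/python/Paul's Misery.py | paul
-- ===== SOURCE A (Python) =====
-- def paul(x):
--     count = 0
--     for i in x:
--         if i=="kata":
--             count+=5
--         if i=="Petes kata":
--             count+=10
--         if i=="eating":
--             count+=1
--     if count<40:
--         return "Super happy!"
--     if 100>count>=70:
--         return "Sad!"
--     if 70>count>=40:
--         return "Happy!"
--     elif count>=100:
--         return "Miserable!"
-- ===== SOURCE B (Python) =====
-- def paul(x):
--     misery = 5 * x.count("kata") + 10 * x.count("Petes kata") + x.count("eating")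
--     moods = ["Super happy!", "Happy!", "Sad!", "Miserable!"]
--     return moods[(misery >= 40) + (misery >= 70) + (misery >= 100)]
-- ===== Notes on version B (the rewrite author's own statement) =====
-- stated objective: idiomatic
-- what changed: Removes the per-item accumulator loop entirely: three list.count passes weighted arithmetically, and the if-cascade becomes a branch-free boolean-arithmetic index into a mood table.
import Mathlib
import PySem

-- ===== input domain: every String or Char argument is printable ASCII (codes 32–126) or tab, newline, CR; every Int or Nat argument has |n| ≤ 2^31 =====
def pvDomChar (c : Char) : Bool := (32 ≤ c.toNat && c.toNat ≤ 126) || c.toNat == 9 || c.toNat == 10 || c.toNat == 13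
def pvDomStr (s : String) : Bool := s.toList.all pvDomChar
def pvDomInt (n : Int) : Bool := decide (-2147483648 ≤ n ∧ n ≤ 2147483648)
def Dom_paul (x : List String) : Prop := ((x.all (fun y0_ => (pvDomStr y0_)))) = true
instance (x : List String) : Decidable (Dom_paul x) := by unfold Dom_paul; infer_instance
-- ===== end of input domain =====

-- B drops the per-item accumulator loop: three weighted list.count passes, and a branch-free
-- boolean-arithmetic index into a mood table replaces the if-cascade (idiomatic).
-- ===== PORT A =====
def paul (x : List String) : String :=
  let count : Int := x.foldl (fun count i =>
    let count := if i == "kata" then count + 5 else count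
    let count := if i == "Petes kata" then count + 10 else count
    let count := if i == "eating" then count + 1 else count
    count) 0
  if count < 40 then "Super happy!"
  else if 100 > count ∧ count ≥ 70 then "Sad!"
  else if 70 > count ∧ count ≥ 40 then "Happy!"
  else if count ≥ 100 then "Miserable!"
  else ""  -- unreachable: the four bands tile ℤ (Python's implicit None is never returned)

-- ===== PORT B =====
def paul_alt (x : List String) : String :=
  let misery : Int :=
    5 * (PySem.List.count x "kata") + 10 * (PySem.List.count x "Petes kata")
      + PySem.List.count x "eating"
  let moods : List String := ["Super happy!", "Happy!", "Sad!", "Miserable!"]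
  let idx : Int := (if misery ≥ 40 then 1 else 0) + (if misery ≥ 70 then 1 else 0)
      + (if misery ≥ 100 then 1 else 0)
  (PySem.List.pyGet? moods idx).getD ""

-- ===== PRECONDITION & SPEC =====
def Spec_paul (x : List String) (out : String) : Prop := out = paul_alt x
instance (x : List String) (out : String) : Decidable (Spec_paul x out) := by unfold Spec_paul; infer_instance

-- ===== CLAIM (what is proved, stated in full; the proofs are below) =====
def Claim_equal_paul : Prop := ∀ (x : List String), Dom_paul x → Spec_paul x (paul x)

-- ===== LEMMAS AND PROOFS =====

-- A's single accumulator loop equals the weighted sum of the three occurrence counts.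
lemma count_eq (x : List String) (c : Int) :
    x.foldl (fun count i =>
      let count := if i == "kata" then count + 5 else count
      let count := if i == "Petes kata" then count + 10 else count
      let count := if i == "eating" then count + 1 else count
      count) c
    = c + 5 * (PySem.List.count x "kata") + 10 * (PySem.List.count x "Petes kata")
        + PySem.List.count x "eating" := by
  induction x generalizing c with
  | nil => simp [PySem.List.count]
  | cons h t ih =>
    simp only [List.foldl_cons, ih]
    by_cases h1 : h = "kata" <;> by_cases h2 : h = "Petes kata" <;> by_cases h3 : h = "eating" <;>
      simp_all [PySem.List.count] <;> ring

-- A's four-way cascade equals B's boolean-arithmetic table lookup, for any total.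
lemma pick_eq (c : Int) :
    (if c < 40 then "Super happy!"
     else if 100 > c ∧ c ≥ 70 then "Sad!"
     else if 70 > c ∧ c ≥ 40 then "Happy!"
     else if c ≥ 100 then "Miserable!"
     else "")
    = (PySem.List.pyGet? ["Super happy!", "Happy!", "Sad!", "Miserable!"]
        ((if c ≥ 40 then 1 else 0) + (if c ≥ 70 then 1 else 0)
          + (if c ≥ 100 then (1 : Int) else 0))).getD "" := by
  by_cases h3 : (100 : Int) ≤ c
  · simp [show (40:Int) ≤ c by omega, show (70:Int) ≤ c by omega, h3, show ¬ c < 40 by omega,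
      show ¬ c < 100 by omega, show ¬ c < 70 by omega, PySem.List.pyGet?, PySem.List.pyIdx?]
  · by_cases h2 : (70 : Int) ≤ c
    · simp [show (40:Int) ≤ c by omega, h2, h3, show ¬ c < 40 by omega,
        show 100 > c ∧ c ≥ 70 by omega, PySem.List.pyGet?, PySem.List.pyIdx?]
    · by_cases h1 : (40 : Int) ≤ c
      · simp [h1, h2, h3, show ¬ c < 40 by omega,
          show 70 > c ∧ c ≥ 40 by omega, PySem.List.pyGet?, PySem.List.pyIdx?]
      · simp [h1, h2, h3, show c < 40 by omega, PySem.List.pyGet?, PySem.List.pyIdx?]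

-- ===== VERDICT (by name: the statement is the Claim_ definition above) =====
theorem paul_spec : Claim_equal_paul := by
  intro x _
  unfold Spec_paul paul paul_alt
  rw [count_eq, pick_eq]
  norm_num
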